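-- pv_equiv track=rewrite | github.com/syntaxaire/AdventOfCode2019 | day1.py | calc_modules_with_fuel
-- ===== SOURCE A (Python) =====
-- from typing import List
--
-- def fuel_required(mass: int) -> int:
--     """Return the amount of fuel required to launch a module with the given mass."""
--     fuel = mass // 3 - 2
--     return fuel if fuel >= 0 else 0
--
-- def calc_modules_with_fuel(masses: List[int]) -> int:
--     """Return the total amount of fuel required to launch the given module masses, taking the
--     added mass of the fuel into account."""
--     total_fuel = 0
--     for module in masses:
--         subtotal_fuel = 0
--         continuing_mass = module
--         while continuing_mass > 0:
--             this_fuel = fuel_required(continuing_mass)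
--             subtotal_fuel += this_fuel
--             continuing_mass = this_fuel
--         total_fuel += subtotal_fuel
--     return total_fuel
-- ===== SOURCE B (Python) =====
-- def calc_modules_with_fuel(masses):
--     """Return the total amount of fuel required to launch the given module masses, taking the
--     added mass of the fuel into account."""
--     def total_fuel(m):
--         f = m // 3 - 2
--         return 0 if f <= 0 else f + total_fuel(f)
--     return sum(total_fuel(m) for m in masses)
-- ===== Notes on version B (the rewrite author's own statement) =====
-- stated objective: simpler
-- what changed: Replaces the accumulator-carrying inner while loop (clamped fuel_required helper plus subtotal/continuing_mass state) by a direct recursive fuel recurrence and a sum over the list.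
import Mathlib
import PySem

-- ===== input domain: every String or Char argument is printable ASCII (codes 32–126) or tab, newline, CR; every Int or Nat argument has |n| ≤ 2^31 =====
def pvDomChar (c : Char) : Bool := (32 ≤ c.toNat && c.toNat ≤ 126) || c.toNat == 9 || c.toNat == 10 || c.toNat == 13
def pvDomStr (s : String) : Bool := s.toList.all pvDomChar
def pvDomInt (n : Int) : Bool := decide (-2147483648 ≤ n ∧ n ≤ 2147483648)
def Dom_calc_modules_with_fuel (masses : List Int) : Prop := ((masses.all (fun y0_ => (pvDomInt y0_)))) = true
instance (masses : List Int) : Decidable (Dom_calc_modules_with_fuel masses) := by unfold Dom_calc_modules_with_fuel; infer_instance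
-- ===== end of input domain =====

-- B replaces A's inner while loop (subtotal/continuing_mass state with a clamping helper) by a
-- direct recursive fuel recurrence summed over the list (objective: simpler).

-- ===== PORT A =====
def fuel_required (mass : Int) : Int :=
  let fuel := PySem.Int.floordiv mass 3 - 2
  if fuel ≥ 0 then fuel else 0

lemma fuel_required_toNat_lt (m : Int) (h : 0 < m) : (fuel_required m).toNat < m.toNat := by
  simp only [fuel_required, PySem.Int.floordiv_eq_ediv_of_pos (show (0:Int) < 3 by norm_num)]
  split <;> omega

-- the inner 'while continuing_mass > 0' loop of A, with its two state variables
def whileA (subtotal continuing_mass : Int) : Int :=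
  if 0 < continuing_mass then
    whileA (subtotal + fuel_required continuing_mass) (fuel_required continuing_mass)
  else subtotal
termination_by continuing_mass.toNat
decreasing_by exact fuel_required_toNat_lt _ (by assumption)

def calc_modules_with_fuel (masses : List Int) : Int :=
  masses.foldl (fun total_fuel module => total_fuel + whileA 0 module) 0

-- ===== PORT B =====
def totalFuel (m : Int) : Int :=
  let f := PySem.Int.floordiv m 3 - 2
  if f ≤ 0 then 0 else f + totalFuel f
termination_by m.toNat
decreasing_by
  rename_i h
  simp only [f, PySem.Int.floordiv_eq_ediv_of_pos (show (0:Int) < 3 by norm_num)] at h ⊢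
  omega

def calc_modules_with_fuel_alt (masses : List Int) : Int :=
  (masses.map totalFuel).sum

-- ===== PRECONDITION & SPEC =====
def Spec_calc_modules_with_fuel (masses : List Int) (out : Int) : Prop := out = calc_modules_with_fuel_alt masses
instance (masses : List Int) (out : Int) : Decidable (Spec_calc_modules_with_fuel masses out) := by unfold Spec_calc_modules_with_fuel; infer_instance

-- ===== CLAIM (what is proved, stated in full; the proofs are below) =====
def Claim_equal_calc_modules_with_fuel : Prop := ∀ (masses : List Int), Dom_calc_modules_with_fuel masses → Spec_calc_modules_with_fuel masses (calc_modules_with_fuel masses)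

-- ===== LEMMAS AND PROOFS =====
lemma whileA_eq (n : Nat) : ∀ (m subtotal : Int), m.toNat = n → whileA subtotal m = subtotal + totalFuel m := by
  induction n using Nat.strong_induction_on with
  | _ n ih =>
    intro m subtotal hn
    rw [whileA, totalFuel.eq_1]
    have h3 : PySem.Int.floordiv m 3 = m / 3 := PySem.Int.floordiv_eq_ediv_of_pos (by norm_num)
    by_cases hm : 0 < m
    · simp only [hm, if_true]
      unfold fuel_required
      by_cases hf : PySem.Int.floordiv m 3 - 2 ≤ 0
      · have hfr : (if PySem.Int.floordiv m 3 - 2 ≥ 0 then PySem.Int.floordiv m 3 - 2 else 0) = 0 := by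
          split <;> omega
        simp only [hfr, hf, if_true]
        rw [whileA]
        simp
      · have hfr : (if PySem.Int.floordiv m 3 - 2 ≥ 0 then PySem.Int.floordiv m 3 - 2 else 0)
            = PySem.Int.floordiv m 3 - 2 := by split <;> omega
        simp only [hfr, hf, if_false]
        rw [ih (PySem.Int.floordiv m 3 - 2).toNat (by rw [h3] at hf ⊢; omega) _ _ rfl]
        ring
    · have hf : m / 3 - 2 ≤ 0 := by omega
      simp [hm, hf]

lemma foldl_eq (l : List Int) : ∀ (acc : Int),
    l.foldl (fun total_fuel module => total_fuel + whileA 0 module) acc = acc + (l.map totalFuel).sum := by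
  induction l with
  | nil => simp [List.foldl]
  | cons x xs ih =>
    intro acc
    simp only [List.foldl, List.map, List.sum_cons, ih, whileA_eq x.toNat x 0 rfl]
    ring

-- ===== VERDICT (by name: the statement is the Claim_ definition above) =====
theorem calc_modules_with_fuel_spec : Claim_equal_calc_modules_with_fuel := by
  intro masses _
  unfold Spec_calc_modules_with_fuel calc_modules_with_fuel calc_modules_with_fuel_alt
  rw [foldl_eq]
  ring
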